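-- pv_equiv track=rewrite | github.com/cdngouma/statcan-wds | statcan_wds/resolver.py | expand_specs
-- ===== SOURCE A (Python) =====
-- from itertools import product
--
-- def expand_specs(query_spec=[]):
--     """
--     Expand a compact spec into the cartesian product of choices.
--     Example:
--         input: [
--             { "Geography": ["Quebec", "Canada"] },
--             { "Trade": ["Import", "Domestic-exports"] },
--             { "NAPCS": "All merchandise" }
--         ]
--
--         output: [
--             { "Geography": "Quebec", "Trade":" Import", "NAPCS": "All merchandise" },
--             ...
--         ]
--     """
--     if not query_spec:
--         return []
--
--     pairs = []
--     for dim in query_spec: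
--         (k,v), = dim.items()
--         vals = v if isinstance(v, (list, tuple)) else [v]
--         pairs.append((k, list(vals)))
--
--     keys = [k for k,_ in pairs]
--     value_lists = [vals for _, vals in pairs]
--
--     return [
--         dict(zip(keys, combo))
--         for combo in product(*value_lists)
--     ]
-- ===== SOURCE B (Python) =====
-- def expand_specs(query_spec=[]):
--     if not query_spec:
--         return []
--     results = [{}]
--     for dim in query_spec:
--         (k, v), = dim.items()
--         vals = v if isinstance(v, (list, tuple)) else [v]
--         results = [{**partial, k: val} for partial in results for val in vals]
--     return results
-- ===== Notes on version B (the rewrite author's own statement) =====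
-- stated objective: simpler
-- what changed: Replaces the pairs/keys/value_lists preprocessing plus itertools.product with a single left-to-right fold that extends partial dicts dimension by dimension, seeded with [{}].
import Mathlib
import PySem

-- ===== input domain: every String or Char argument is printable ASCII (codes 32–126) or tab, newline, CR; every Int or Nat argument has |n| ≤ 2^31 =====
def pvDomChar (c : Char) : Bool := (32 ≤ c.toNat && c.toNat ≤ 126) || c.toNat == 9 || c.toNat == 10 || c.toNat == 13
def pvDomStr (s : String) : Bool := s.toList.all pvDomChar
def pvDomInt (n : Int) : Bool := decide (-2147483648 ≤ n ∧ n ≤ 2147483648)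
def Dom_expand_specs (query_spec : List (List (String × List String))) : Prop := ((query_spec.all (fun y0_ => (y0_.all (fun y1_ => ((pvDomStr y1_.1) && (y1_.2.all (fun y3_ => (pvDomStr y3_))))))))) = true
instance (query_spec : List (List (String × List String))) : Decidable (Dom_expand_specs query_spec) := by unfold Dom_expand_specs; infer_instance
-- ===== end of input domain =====

-- B replaces the pairs/keys/value_lists preprocessing + itertools.product by one fold extending
-- partial dicts dimension by dimension (objective: simpler, no import).

-- ===== PORT A =====
-- itertools.product(*value_lists): the last list varies fastest
def prodA : List (List String) → List (List String)
  | [] => [[]]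
  | vs :: rest => vs.flatMap (fun v => (prodA rest).map (v :: ·))

-- `(k,v), = dim.items()` requires exactly one item (Pre_); on the Lean type v is always a list,
-- so `vals = v if isinstance(v, (list, tuple)) else [v]` is `vals = v`.
def expand_specs (query_spec : List (List (String × List String))) : List (List (String × String)) :=
  if query_spec = [] then [] else
  let pairs := query_spec.map (fun dim => dim.headD ("", []))
  let keys := pairs.map Prod.fst
  let value_lists := pairs.map Prod.snd
  (prodA value_lists).map (fun combo => (PySem.Dict.ofList (keys.zip combo)).items)

-- ===== PORT B =====
def expand_specs_alt (query_spec : List (List (String × List String))) : List (List (String × String)) :=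
  if query_spec = [] then [] else
  (query_spec.foldl
    (fun results dim =>
      let p := dim.headD ("", [])
      results.flatMap (fun partial_ => p.2.map (fun v => partial_.insert p.1 v)))
    [(PySem.Dict.empty : PySem.Dict String String)]).map PySem.Dict.items

-- ===== PRECONDITION & SPEC =====
-- Pre_ excludes dims with other than exactly one (key, values) item: there A's unpacking
-- `(k,v), = dim.items()` raises ValueError.
def Pre_expand_specs (query_spec : List (List (String × List String))) : Prop :=
  ∀ dim ∈ query_spec, dim.length = 1
instance (query_spec : List (List (String × List String))) : Decidable (Pre_expand_specs query_spec) := by unfold Pre_expand_specs; infer_instance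
def pvWitness_expand_specs : (List (List (String × List String))) :=
  [[("Geography", ["Quebec", "Canada"])], [("Trade", ["Import"])]]
def Spec_expand_specs (query_spec : List (List (String × List String))) (out : List (List (String × String))) : Prop := out = expand_specs_alt query_spec
instance (query_spec : List (List (String × List String))) (out : List (List (String × String))) : Decidable (Spec_expand_specs query_spec out) := by unfold Spec_expand_specs; infer_instance

-- ===== CLAIM (what is proved, stated in full; the proofs are below) =====
def Claim_equal_expand_specs : Prop := ∀ (query_spec : List (List (String × List String))), Dom_expand_specs query_spec → Pre_expand_specs query_spec → Spec_expand_specs query_spec (expand_specs query_spec)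

-- ===== LEMMAS AND PROOFS =====
theorem key_lemma (pairs : List (String × List String)) (acc : List (PySem.Dict String String)) :
    pairs.foldl
      (fun results p => results.flatMap (fun d => p.2.map (fun v => d.insert p.1 v))) acc
    = acc.flatMap (fun d => (prodA (pairs.map Prod.snd)).map
        (fun combo => ((pairs.map Prod.fst).zip combo).foldl (fun d kv => d.insert kv.1 kv.2) d)) := by
  induction pairs generalizing acc with
  | nil => simp [prodA]
  | cons p rest ih =>
      simp only [List.foldl_cons, ih, List.map_cons, prodA]
      simp [List.flatMap_assoc, List.map_flatMap, List.flatMap_map, Function.comp_def]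

theorem foldl_headD (qs : List (List (String × List String))) (acc : List (PySem.Dict String String)) :
    qs.foldl (fun results dim =>
      results.flatMap (fun d => (dim.headD ("", [])).2.map (fun v => d.insert (dim.headD ("", [])).1 v))) acc
    = (qs.map (fun dim => dim.headD ("", []))).foldl
        (fun results p => results.flatMap (fun d => p.2.map (fun v => d.insert p.1 v))) acc := by
  induction qs generalizing acc with
  | nil => rfl
  | cons dim rest ih => simp only [List.foldl_cons, List.map_cons, ih]

theorem ofList_eq_foldl (l : List (String × String)) :
    PySem.Dict.ofList l = l.foldl (fun d kv => d.insert kv.1 kv.2) PySem.Dict.empty := rfl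

-- ===== VERDICT (by name: the statement is the Claim_ definition above) =====
theorem expand_specs_spec : Claim_equal_expand_specs := by
  intro qs _ _
  show expand_specs qs = expand_specs_alt qs
  unfold expand_specs expand_specs_alt
  split
  · rfl
  · simp only []
    rw [foldl_headD, key_lemma]
    simp [ofList_eq_foldl]
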